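-- pv_equiv track=rewrite | github.com/yunakim2/Algorithm_Python | 프로그래머스/level1/힙 사용법 튜토리얼.py | solution
-- ===== SOURCE A (Python) =====
-- from collections import deque
-- import heapq
--
-- def solution(n, exec_times):
--     queue = deque(exec_times)
--
--     FINISHED_AT, SERVER_ID, JOBS_DONE = 0, 1, 2
--     servers = [[0, i, 0] for i in range(n)]
--     heapq.heapify(servers)
--
--     while queue:
--         target_server = heapq.heappop(servers)
--         target_server[FINISHED_AT] += queue.popleft()
--         target_server[JOBS_DONE] += 1
--         heapq.heappush(servers, target_server)
--
--     servers.sort(key=lambda x: x[SERVER_ID])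
--     return [server[JOBS_DONE] for server in servers]
-- ===== SOURCE B (Python) =====
-- def solution(n, exec_times):
--     finish = [0] * n
--     counts = [0] * n
--     for t in exec_times:
--         best = 0
--         for i in range(1, n):
--             if finish[i] < finish[best]:
--                 best = i
--         finish[best] += t
--         counts[best] += 1
--     return counts
-- ===== Notes on version B (the rewrite author's own statement) =====
-- stated objective: simpler
-- what changed: Replaces the heap of [finish, id, jobs] triples plus a final sort-by-id with two plain arrays (finish times and counts) and a left-to-right strict-min scan per job, returning the counts array directly in server-id order.
import Mathlib
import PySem

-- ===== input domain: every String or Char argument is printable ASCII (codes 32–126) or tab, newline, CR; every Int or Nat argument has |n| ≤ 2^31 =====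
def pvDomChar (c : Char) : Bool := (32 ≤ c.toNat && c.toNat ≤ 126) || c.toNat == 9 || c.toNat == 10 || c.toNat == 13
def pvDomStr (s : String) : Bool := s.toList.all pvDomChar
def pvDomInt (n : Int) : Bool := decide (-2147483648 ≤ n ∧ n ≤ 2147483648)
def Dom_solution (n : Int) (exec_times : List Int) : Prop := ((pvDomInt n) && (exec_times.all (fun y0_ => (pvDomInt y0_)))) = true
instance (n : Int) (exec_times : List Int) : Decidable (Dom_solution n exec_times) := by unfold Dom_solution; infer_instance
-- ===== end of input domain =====

-- B replaces A's heap of [finish, id, jobs] triples plus a final sort-by-id with two plain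
-- arrays (finish times, counts) and a per-job left-to-right strict-min scan; objective: simpler.

-- ===== PORT A =====
-- lexicographic minimum of two [finished_at, server_id, jobs_done] triples
-- (Python list comparison; heapq pops the lexicographically least triple)
def tmin (a b : Int × Int × Int) : Int × Int × Int :=
  if a.1 < b.1 ∨ (a.1 = b.1 ∧ (a.2.1 < b.2.1 ∨ (a.2.1 = b.2.1 ∧ a.2.2 < b.2.2))) then a else b

-- one iteration of A's while-loop: heappop the least triple, update it, heappush it back
-- (heap contents modelled as a plain list; [] case unreachable under Pre_solution)
def heapStep (srv : List (Int × Int × Int)) (t : Int) : List (Int × Int × Int) :=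
  match srv with
  | [] => []
  | x :: xs =>
    let m := xs.foldl tmin x
    ((x :: xs).erase m) ++ [(m.1 + t, m.2.1, m.2.2 + 1)]

def solution (n : Int) (exec_times : List Int) : List Int :=
  (PySem.List.sorted
      (exec_times.foldl heapStep ((List.range n.toNat).map (fun i : Nat => ((0 : Int), (i : Int), (0 : Int)))))
      (fun s => s.2.1) false).map
    (fun s => s.2.2)

-- ===== PORT B =====
-- best = 0; for i in range(1, n): if finish[i] < finish[best]: best = i
def bestIdx (fin : List Int) (k : Nat) : Nat :=
  (List.range' 1 k).foldl (fun b i => if fin.getD i 0 < fin.getD b 0 then i else b) 0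

-- loop body: pick the least-loaded server (lowest id on ties), add the job there
def bStep (m : Nat) (st : List Int × List Int) (t : Int) : List Int × List Int :=
  let b := bestIdx st.1 (m - 1)
  (st.1.set b (st.1.getD b 0 + t), st.2.set b (st.2.getD b 0 + 1))

def solution_alt (n : Int) (exec_times : List Int) : List Int :=
  (exec_times.foldl (bStep n.toNat) (List.replicate n.toNat 0, List.replicate n.toNat 0)).2

-- ===== PRECONDITION & SPEC =====
-- Pre_ excludes only inputs where A raises: with exec_times nonempty and n ≤ 0 the heap is
-- empty and heappop raises IndexError (B's finish[0] raises IndexError there too).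
def Pre_solution (n : Int) (exec_times : List Int) : Prop := exec_times = [] ∨ 1 ≤ n
instance (n : Int) (exec_times : List Int) : Decidable (Pre_solution n exec_times) := by unfold Pre_solution; infer_instance
def pvWitness_solution : Int × List Int := (3, [5, 2, 7, 2])

def Spec_solution (n : Int) (exec_times : List Int) (out : List Int) : Prop := out = solution_alt n exec_times
instance (n : Int) (exec_times : List Int) (out : List Int) : Decidable (Spec_solution n exec_times out) := by unfold Spec_solution; infer_instance

-- ===== CLAIM (what is proved, stated in full; the proofs are below) =====
def Claim_equal_solution : Prop := ∀ (n : Int) (exec_times : List Int), Dom_solution n exec_times → Pre_solution n exec_times → Spec_solution n exec_times (solution n exec_times)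

-- ===== LEMMAS AND PROOFS =====

-- non-strict lexicographic order on triples
def tle (a b : Int × Int × Int) : Prop :=
  a.1 < b.1 ∨ (a.1 = b.1 ∧ (a.2.1 < b.2.1 ∨ (a.2.1 = b.2.1 ∧ a.2.2 ≤ b.2.2)))

-- the canonical server list in id order, built from B's two arrays
def canon (fin cnt : List Int) : List (Int × Int × Int) :=
  (List.range fin.length).map (fun i => (fin.getD i 0, (i : Int), cnt.getD i 0))

lemma tle_antisymm {a b : Int × Int × Int} (h1 : tle a b) (h2 : tle b a) : a = b := by
  obtain ⟨a1, a2, a3⟩ := a; obtain ⟨b1, b2, b3⟩ := b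
  simp only [tle] at h1 h2
  try dsimp only at h1 h2
  have : a1 = b1 ∧ a2 = b2 ∧ a3 = b3 := by omega
  simp [this.1, this.2.1, this.2.2]

lemma tmin_le_left (a b : Int × Int × Int) : tle (tmin a b) a := by
  obtain ⟨a1, a2, a3⟩ := a; obtain ⟨b1, b2, b3⟩ := b
  simp only [tmin, tle]
  split <;> rename_i h <;> (try dsimp only at h ⊢) <;> omega

lemma tmin_le_right (a b : Int × Int × Int) : tle (tmin a b) b := by
  obtain ⟨a1, a2, a3⟩ := a; obtain ⟨b1, b2, b3⟩ := b
  simp only [tmin, tle]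
  split <;> rename_i h <;> (try dsimp only at h ⊢) <;> omega

lemma tle_trans {a b c : Int × Int × Int} (h1 : tle a b) (h2 : tle b c) : tle a c := by
  obtain ⟨a1, a2, a3⟩ := a; obtain ⟨b1, b2, b3⟩ := b; obtain ⟨c1, c2, c3⟩ := c
  simp only [tle] at *; try dsimp only at *
  omega

lemma foldl_tmin_mem (x : Int × Int × Int) (xs : List (Int × Int × Int)) :
    xs.foldl tmin x ∈ x :: xs := by
  induction xs generalizing x with
  | nil => simp [List.foldl]
  | cons y ys ih =>
    have h := ih (tmin x y)
    have hm : tmin x y = x ∨ tmin x y = y := by unfold tmin; split <;> simp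
    simp only [List.foldl_cons]
    rcases List.mem_cons.mp h with h | h
    · rcases hm with hm | hm
      · rw [List.mem_cons]; left; rw [h, hm]
      · rw [List.mem_cons, List.mem_cons]; right; left; rw [h, hm]
    · simp [h]

lemma foldl_tmin_le (x : Int × Int × Int) (xs : List (Int × Int × Int)) :
    ∀ y ∈ x :: xs, tle (xs.foldl tmin x) y := by
  induction xs generalizing x with
  | nil =>
    intro y hy
    have hx : y = x := by simpa using hy
    subst hx
    obtain ⟨a1, a2, a3⟩ := y
    simp [List.foldl_nil, tle]
  | cons z zs ih =>
    intro y hy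
    simp only [List.foldl_cons]
    have hself : tmin x z ∈ tmin x z :: zs := List.mem_cons.mpr (Or.inl rfl)
    rcases List.mem_cons.mp hy with h | h
    · rw [h]; exact tle_trans (ih (tmin x z) _ hself) (tmin_le_left x z)
    · rcases List.mem_cons.mp h with h' | h'
      · rw [h']; exact tle_trans (ih (tmin x z) _ hself) (tmin_le_right x z)
      · exact ih (tmin x z) _ (List.mem_cons.mpr (Or.inr h'))

-- the fold-min is determined by the membership set alone (uniqueness of the lex minimum)
lemma foldl_tmin_eq_of_perm {x y : Int × Int × Int} {xs ys : List (Int × Int × Int)}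
    (h : (x :: xs).Perm (y :: ys)) : xs.foldl tmin x = ys.foldl tmin y := by
  have m1 := foldl_tmin_mem x xs
  have m2 := foldl_tmin_mem y ys
  exact tle_antisymm
    (foldl_tmin_le x xs _ (h.mem_iff.mpr m2))
    (foldl_tmin_le y ys _ (h.symm.mem_iff.mpr m1))

-- getD/set facts
lemma getD_set_self {l : List Int} {b : Nat} (h : b < l.length) (v : Int) :
    (l.set b v).getD b 0 = v := by
  simp [List.getD, h]

lemma getD_set_ne {l : List Int} {b i : Nat} (h : i ≠ b) (v : Int) :
    (l.set b v).getD i 0 = l.getD i 0 := by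
  simp [List.getD, List.getElem?_set_ne (by omega : b ≠ i)]

-- the min fold over canon's tail mirrors B's best-index fold
lemma canon_fold_eq (fin cnt : List Int) :
    ∀ (k s b : Nat), b < s →
      ((List.range' s k).map (fun i => (fin.getD i 0, (i : Int), cnt.getD i 0))).foldl tmin
          (fin.getD b 0, (b : Int), cnt.getD b 0)
        = (fun j => (fin.getD j 0, (j : Int), cnt.getD j 0))
            ((List.range' s k).foldl (fun b i => if fin.getD i 0 < fin.getD b 0 then i else b) b) := by
  intro k
  induction k with
  | zero => intro s b _; simp
  | succ k ih =>
    intro s b hbs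
    simp only [List.range'_succ, List.map_cons, List.foldl_cons]
    have hstep : tmin (fin.getD b 0, (b : Int), cnt.getD b 0) (fin.getD s 0, (s : Int), cnt.getD s 0)
        = (fun j => (fin.getD j 0, (j : Int), cnt.getD j 0))
            (if fin.getD s 0 < fin.getD b 0 then s else b) := by
      simp only [tmin]
      have hbs' : (b : Int) < (s : Int) := by exact_mod_cast hbs
      split_ifs with h1 h2 h2
      · omega
      · rfl
      · rfl
      · omega
    rw [hstep]
    split_ifs with h
    · exact (by simpa [h] using ih (s + 1) s (by omega))
    · exact (by simpa [h] using ih (s + 1) b (by omega))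

lemma bestIdx_lt (fin : List Int) (m : Nat) (hm : 1 ≤ m) : bestIdx fin (m - 1) < m := by
  unfold bestIdx
  have : ∀ (l : List Nat) (b : Nat), (∀ i ∈ l, i < m) → b < m →
      l.foldl (fun b i => if fin.getD i 0 < fin.getD b 0 then i else b) b < m := by
    intro l
    induction l with
    | nil => intro b _ hb; simpa using hb
    | cons x xs ih =>
      intro b hl hb
      simp only [List.foldl_cons]
      split_ifs with h
      · exact ih _ (fun i hi => hl i (by simp [hi])) (hl x (by simp))
      · exact ih _ (fun i hi => hl i (by simp [hi])) hb
  exact this _ 0 (fun i hi => by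
    have := List.mem_range'.mp hi; omega) (by omega)

-- canon splits around any index b < length
lemma canon_split (fin cnt : List Int) (b : Nat) (hb : b < fin.length) :
    canon fin cnt
      = ((List.range b).map (fun i => (fin.getD i 0, (i : Int), cnt.getD i 0)))
        ++ (fin.getD b 0, (b : Int), cnt.getD b 0)
        :: ((List.range' (b + 1) (fin.length - b - 1)).map (fun i => (fin.getD i 0, (i : Int), cnt.getD i 0))) := by
  unfold canon
  have h1 : List.range fin.length = List.range' 0 b ++ List.range' b (fin.length - b) := by
    rw [List.range_eq_range']
    have h := List.range'_append (s := 0) (m := b) (n := fin.length - b) (step := 1)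
    simp only [Nat.zero_add, Nat.one_mul] at h
    rw [h]
    congr 1
    omega
  have h2 : List.range' b (fin.length - b) = b :: List.range' (b + 1) (fin.length - b - 1) := by
    have h : fin.length - b = (fin.length - b - 1) + 1 := by omega
    rw [h, List.range'_succ]
    simp
  rw [h1, h2]
  simp [List.range_eq_range']

lemma step_preserves (fin cnt : List Int) (L : List (Int × Int × Int)) (t : Int)
    (hf : 1 ≤ fin.length) (hc : cnt.length = fin.length) (hp : L.Perm (canon fin cnt)) :
    let b := bestIdx fin (fin.length - 1)
    (heapStep L t).Perm (canon (fin.set b (fin.getD b 0 + t)) (cnt.set b (cnt.getD b 0 + 1)))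
    ∧ (fin.set b (fin.getD b 0 + t)).length = fin.length
    ∧ (cnt.set b (cnt.getD b 0 + 1)).length = fin.length := by
  intro b
  have hb : b < fin.length := bestIdx_lt fin fin.length hf
  refine ⟨?_, by simp, by simp [hc]⟩
  -- L is nonempty
  have hcanonlen : (canon fin cnt).length = fin.length := by simp [canon]
  have hLlen : L.length = fin.length := by rw [hp.length_eq, hcanonlen]
  obtain ⟨x, xs, rfl⟩ : ∃ x xs, L = x :: xs := by
    cases L with
    | nil => exfalso; simp at hLlen; omega
    | cons x xs => exact ⟨x, xs, rfl⟩
  -- canon is nonempty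
  obtain ⟨y, ys, hcy⟩ : ∃ y ys, canon fin cnt = y :: ys := by
    cases h : canon fin cnt with
    | nil => exfalso; rw [h] at hcanonlen; simp at hcanonlen; omega
    | cons y ys => exact ⟨y, ys, rfl⟩
  -- identify the minimum
  have hmin : xs.foldl tmin x = (fin.getD b 0, (b : Int), cnt.getD b 0) := by
    have h1 : xs.foldl tmin x = ys.foldl tmin y := foldl_tmin_eq_of_perm (hcy ▸ hp)
    have hsplit0 : canon fin cnt
        = (fin.getD 0 0, ((0:Nat) : Int), cnt.getD 0 0)
          :: ((List.range' 1 (fin.length - 1)).map (fun i => (fin.getD i 0, (i : Int), cnt.getD i 0))) := by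
      have := canon_split fin cnt 0 (by omega)
      simpa using this
    rw [hcy] at hsplit0
    have hy : y = (fin.getD 0 0, ((0:Nat) : Int), cnt.getD 0 0) := by
      exact (List.cons.injEq _ _ _ _ ▸ hsplit0).1
    have hys : ys = (List.range' 1 (fin.length - 1)).map (fun i => (fin.getD i 0, (i : Int), cnt.getD i 0)) := by
      exact (List.cons.injEq _ _ _ _ ▸ hsplit0).2
    rw [h1, hy, hys]
    have := canon_fold_eq fin cnt (fin.length - 1) 1 0 (by omega)
    simpa [bestIdx, b] using this
  -- the step
  set mt : Int × Int × Int := (fin.getD b 0, (b : Int), cnt.getD b 0) with hmt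
  have hstep : heapStep (x :: xs) t = ((x :: xs).erase mt) ++ [(mt.1 + t, mt.2.1, mt.2.2 + 1)] := by
    simp only [heapStep, hmin]
  rw [hstep]
  -- canon of the updated arrays
  set fin' := fin.set b (fin.getD b 0 + t) with hfin'
  set cnt' := cnt.set b (cnt.getD b 0 + 1) with hcnt'
  have hlen' : fin'.length = fin.length := by simp [hfin']
  have hb' : b < fin'.length := by omega
  have hsplit := canon_split fin cnt b hb
  have hsplit' := canon_split fin' cnt' b hb'
  have hPmap : (List.range b).map (fun i => (fin'.getD i 0, (i : Int), cnt'.getD i 0))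
      = (List.range b).map (fun i => (fin.getD i 0, (i : Int), cnt.getD i 0)) := by
    apply List.map_congr_left; intro i hi
    have hne : i ≠ b := by have := List.mem_range.mp hi; omega
    rw [hfin', hcnt', getD_set_ne hne, getD_set_ne hne]
  have hSmap : (List.range' (b + 1) (fin'.length - b - 1)).map (fun i => (fin'.getD i 0, (i : Int), cnt'.getD i 0))
      = (List.range' (b + 1) (fin.length - b - 1)).map (fun i => (fin.getD i 0, (i : Int), cnt.getD i 0)) := by
    rw [hlen']
    apply List.map_congr_left; intro i hi
    have hne : i ≠ b := by have := List.mem_range'.mp hi; omega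
    rw [hfin', hcnt', getD_set_ne hne, getD_set_ne hne]
  set P := (List.range b).map (fun i => (fin.getD i 0, (i : Int), cnt.getD i 0)) with hP
  set S := (List.range' (b + 1) (fin.length - b - 1)).map (fun i => (fin.getD i 0, (i : Int), cnt.getD i 0)) with hS
  have hcanon' : canon fin' cnt' = P ++ (mt.1 + t, mt.2.1, mt.2.2 + 1) :: S := by
    have e1 : fin'.getD b 0 = fin.getD b 0 + t := by
      rw [hfin']; exact getD_set_self hb _
    have e2 : cnt'.getD b 0 = cnt.getD b 0 + 1 := by
      rw [hcnt']; exact getD_set_self (by omega) _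
    rw [hsplit', hPmap, hSmap, e1, e2]
  -- erase the min from L via the perm
  have hmtnotP : mt ∉ P := by
    intro hmem
    rw [hP] at hmem
    obtain ⟨i, hi, heq⟩ := List.mem_map.mp hmem
    have hib : i < b := List.mem_range.mp hi
    have : ((i : Int)) = (b : Int) := by
      have := congrArg (fun p => p.2.1) heq; simpa [hmt] using this
    omega
  have heraseCanon : (canon fin cnt).erase mt = P ++ S := by
    rw [hsplit]
    rw [List.erase_append_right _ hmtnotP]
    simp [hmt]
  have hperm1 : ((x :: xs).erase mt).Perm (P ++ S) := by
    rw [← heraseCanon]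
    exact hp.erase mt
  rw [hcanon']
  have hA : (((x :: xs).erase mt) ++ [(mt.1 + t, mt.2.1, mt.2.2 + 1)]).Perm
      ((P ++ S) ++ [(mt.1 + t, mt.2.1, mt.2.2 + 1)]) := hperm1.append_right _
  have hB : ((P ++ S) ++ [(mt.1 + t, mt.2.1, mt.2.2 + 1)]).Perm
      ((mt.1 + t, mt.2.1, mt.2.2 + 1) :: (P ++ S)) := List.perm_append_singleton _ _
  have hC : ((mt.1 + t, mt.2.1, mt.2.2 + 1) :: (P ++ S)).Perm
      (P ++ (mt.1 + t, mt.2.1, mt.2.2 + 1) :: S) := List.perm_middle.symm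
  exact (hA.trans hB).trans hC

-- canon is strictly increasing in the server-id key
lemma canon_pairwise (fin cnt : List Int) :
    (canon fin cnt).Pairwise (fun a b => a.2.1 < b.2.1) := by
  unfold canon
  exact List.Pairwise.map _ (fun a b h => by dsimp only; exact_mod_cast h) List.pairwise_lt_range

lemma map_cnt (cnt : List Int) :
    ((List.range cnt.length).map (fun i => cnt.getD i 0)) = cnt := by
  apply List.ext_getElem
  · simp
  · intro i h1 h2
    simp [List.getD, List.getElem?_eq_getElem h2]

lemma canon_init (m : Nat) :
    (List.range m).map (fun i : Nat => ((0 : Int), (i : Int), (0 : Int)))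
      = canon (List.replicate m 0) (List.replicate m 0) := by
  unfold canon
  rw [List.length_replicate]
  apply List.map_congr_left
  intro i hi
  have h := List.mem_range.mp hi
  simp [List.getD, h]

-- the main loop invariant, by induction over exec_times
lemma loop_inv (ts : List Int) :
    ∀ (m : Nat) (fin cnt : List Int) (L : List (Int × Int × Int)),
      fin.length = m → cnt.length = m → 1 ≤ m → L.Perm (canon fin cnt) →
      (ts.foldl (bStep m) (fin, cnt)).1.length = m ∧
      (ts.foldl (bStep m) (fin, cnt)).2.length = m ∧
      (ts.foldl heapStep L).Perm
        (canon (ts.foldl (bStep m) (fin, cnt)).1 (ts.foldl (bStep m) (fin, cnt)).2) := by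
  induction ts with
  | nil => intro m fin cnt L h1 h2 _ h3; exact ⟨h1, h2, h3⟩
  | cons t ts ih =>
    intro m fin cnt L h1 h2 hm h3
    simp only [List.foldl_cons]
    have hs := step_preserves fin cnt L t (by omega) (by omega) h3
    obtain ⟨hperm', hlf, hlc⟩ := hs
    have hbs : bStep m (fin, cnt) t
        = (fin.set (bestIdx fin (fin.length - 1)) (fin.getD (bestIdx fin (fin.length - 1)) 0 + t),
           cnt.set (bestIdx fin (fin.length - 1)) (cnt.getD (bestIdx fin (fin.length - 1)) 0 + 1)) := by
      simp only [bStep, h1]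
    rw [hbs]
    exact ih m _ _ _ (by rw [hlf]; omega) (by rw [hlc]; omega) hm hperm'

-- unpack the final sort+map step from the permutation invariant
lemma final_step (L : List (Int × Int × Int)) (fin cnt : List Int)
    (hc : cnt.length = fin.length) (hp : L.Perm (canon fin cnt)) :
    (PySem.List.sorted L (fun s => s.2.1) false).map (fun s => s.2.2) = cnt := by
  have hsorted : PySem.List.sorted L (fun s => s.2.1) false = canon fin cnt :=
    PySem.List.sorted_eq_of_perm_of_pairwise_lt _ _ _ hp.symm (canon_pairwise fin cnt)
  rw [hsorted]
  unfold canon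
  rw [List.map_map]
  have : ((fun s : Int × Int × Int => s.2.2) ∘ fun i => (fin.getD i 0, (i : Int), cnt.getD i 0))
      = fun i => cnt.getD i 0 := rfl
  rw [this, ← hc, map_cnt]

-- ===== VERDICT (by name: the statement is the Claim_ definition above) =====
theorem solution_spec : Claim_equal_solution := by
  intro n exec_times _ hpre
  unfold Spec_solution solution solution_alt
  rcases hpre with rfl | hn
  · -- empty job list: A returns the zero counts in id order, B returns the zero array
    simp only [List.foldl_nil]
    refine final_step _ (List.replicate n.toNat 0) (List.replicate n.toNat 0) (by simp) ?_
    rw [canon_init]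
  · -- n ≥ 1: run the loop invariant
    have hm1 : 1 ≤ n.toNat := by omega
    have hinv := loop_inv exec_times n.toNat (List.replicate n.toNat 0) (List.replicate n.toNat 0)
      ((List.range n.toNat).map (fun i : Nat => ((0 : Int), (i : Int), (0 : Int))))
      (by simp) (by simp) hm1 (by rw [canon_init])
    obtain ⟨h1, h2, hperm⟩ := hinv
    exact final_step _ _ _ (by omega) hperm
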